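-- pv_equiv track=rewrite | github.com/kklocker/music-projects | drop-voicing-arpeggios/source/chord.py | adjustOctaveForAscendingChord
-- ===== SOURCE A (Python) =====
-- def adjustOctaveForAscendingChord(chord: list[int], n_tones: int) -> list[int]:
--     prev = 0
--     res = []
--     for current in chord:
--         while current < prev:
--             current += n_tones
--
--         prev = current
--         res.append(current)
--
--     return res
-- ===== SOURCE B (Python) =====
-- def adjustOctaveForAscendingChord(chord: list[int], n_tones: int) -> list[int]:
--     prev = 0
--     res = []
--     for x in chord:
--         if x < prev:
--             # raise by exactly ceil((prev - x) / n_tones) octaves, computed by floor division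
--             x -= ((x - prev) // n_tones) * n_tones
--         res.append(x)
--         prev = x
--     return res
-- ===== Notes on version B (the rewrite author's own statement) =====
-- stated objective: faster
-- what changed: The inner while loop that repeatedly adds n_tones until the note reaches the previous one is replaced by a single floor-division computing the needed multiple of n_tones in closed form.
import Mathlib
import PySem

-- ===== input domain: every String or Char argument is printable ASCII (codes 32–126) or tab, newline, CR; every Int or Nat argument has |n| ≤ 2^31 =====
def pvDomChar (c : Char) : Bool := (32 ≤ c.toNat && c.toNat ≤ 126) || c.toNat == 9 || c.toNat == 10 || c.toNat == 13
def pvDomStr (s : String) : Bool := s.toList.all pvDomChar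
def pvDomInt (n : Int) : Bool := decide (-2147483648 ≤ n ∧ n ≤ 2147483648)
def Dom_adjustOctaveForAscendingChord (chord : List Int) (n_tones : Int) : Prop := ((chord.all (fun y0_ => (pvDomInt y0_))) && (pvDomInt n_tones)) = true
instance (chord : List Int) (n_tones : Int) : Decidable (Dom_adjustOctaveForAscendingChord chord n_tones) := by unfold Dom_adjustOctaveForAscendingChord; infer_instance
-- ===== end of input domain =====

-- B replaces A's repeated addition of n_tones by one closed-form floor division per note (asymptotically faster).


-- ===== PORT A =====
-- A's inner 'while current < prev: current += n_tones'.  The '0 < n_tones' test is only a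
-- totality guard: when n_tones ≤ 0 and current < prev the Python loop diverges (excluded by Pre_).
def pyBumpA (prev current n_tones : Int) : Int :=
  if current < prev then
    if 0 < n_tones then pyBumpA prev (current + n_tones) n_tones
    else current
  else current
termination_by (prev - current).toNat
decreasing_by omega

def adjustOctaveForAscendingChord (chord : List Int) (n_tones : Int) : List Int :=
  (chord.foldl (fun (st : Int × List Int) current =>
      let c := pyBumpA st.1 current n_tones
      (c, st.2 ++ [c])) (0, [])).2

-- ===== PORT B =====
def adjustOctaveForAscendingChord_alt (chord : List Int) (n_tones : Int) : List Int :=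
  (chord.foldl (fun (st : Int × List Int) x =>
      let x' := if x < st.1 then x - (PySem.Int.floordiv (x - st.1) n_tones) * n_tones else x
      (x', st.2 ++ [x'])) (0, [])).2

-- ===== PRECONDITION & SPEC =====
-- Pre_ is exactly where the Python A returns: with n_tones ≤ 0 the while loop diverges as soon as
-- a note is below the running previous one, so then the chord must already be a chain 0 ≤ c₀ ≤ c₁ ≤ ….
def Pre_adjustOctaveForAscendingChord (chord : List Int) (n_tones : Int) : Prop :=
  0 < n_tones ∨ List.IsChain (· ≤ ·) (0 :: chord)
instance (chord : List Int) (n_tones : Int) : Decidable (Pre_adjustOctaveForAscendingChord chord n_tones) := by unfold Pre_adjustOctaveForAscendingChord; infer_instance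

def pvWitness_adjustOctaveForAscendingChord : List Int × Int := ([7, 4, 11, 2], 12)

def Spec_adjustOctaveForAscendingChord (chord : List Int) (n_tones : Int) (out : List Int) : Prop := out = adjustOctaveForAscendingChord_alt chord n_tones
instance (chord : List Int) (n_tones : Int) (out : List Int) : Decidable (Spec_adjustOctaveForAscendingChord chord n_tones out) := by unfold Spec_adjustOctaveForAscendingChord; infer_instance

-- ===== CLAIM (what is proved, stated in full; the proofs are below) =====
def Claim_equal_adjustOctaveForAscendingChord : Prop := ∀ (chord : List Int) (n_tones : Int), Dom_adjustOctaveForAscendingChord chord n_tones → Pre_adjustOctaveForAscendingChord chord n_tones → Spec_adjustOctaveForAscendingChord chord n_tones (adjustOctaveForAscendingChord chord n_tones)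

-- ===== LEMMAS AND PROOFS =====

-- For a positive step, A's while loop computes B's closed form.
theorem pyBumpA_eq (prev current n_tones : Int) (hn : 0 < n_tones) :
    pyBumpA prev current n_tones =
      if current < prev then current - (PySem.Int.floordiv (current - prev) n_tones) * n_tones
      else current := by
  induction current using pyBumpA.induct prev n_tones with
  | case1 x h hpos ih =>
    rw [pyBumpA, if_pos h, if_pos hpos, ih, if_pos h]
    by_cases h2 : x + n_tones < prev
    · rw [if_pos h2]
      have e1 : PySem.Int.floordiv (x + n_tones - prev) n_tones
          = PySem.Int.floordiv (x - prev) n_tones + 1 := by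
        rw [PySem.Int.floordiv_eq_iff_of_pos hn]
        have h3 := (PySem.Int.floordiv_eq_iff_of_pos (a := x - prev)
            (q := PySem.Int.floordiv (x - prev) n_tones) hn).mp rfl
        constructor <;> nlinarith [h3.1, h3.2]
      rw [e1]; ring
    · rw [if_neg h2]
      have e1 : PySem.Int.floordiv (x - prev) n_tones = -1 := by
        rw [PySem.Int.floordiv_eq_iff_of_pos hn]
        constructor <;> omega
      rw [e1]; ring
  | case2 x h hng =>
    omega
  | case3 x h =>
    rw [pyBumpA, if_neg h, if_neg h]

-- With no step possible (chain case, or in general current ≥ prev) both sides return current.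
theorem pyBumpA_of_ge (prev current n_tones : Int) (h : prev ≤ current) :
    pyBumpA prev current n_tones = current := by
  rw [pyBumpA, if_neg (by omega)]

theorem fold_eq (n_tones : Int) (chord : List Int) :
    ∀ (prev : Int) (acc : List Int),
      (0 < n_tones ∨ List.IsChain (· ≤ ·) (prev :: chord)) →
      (chord.foldl (fun (st : Int × List Int) current =>
          let c := pyBumpA st.1 current n_tones
          (c, st.2 ++ [c])) (prev, acc)).2 =
      (chord.foldl (fun (st : Int × List Int) x =>
          let x' := if x < st.1 then x - (PySem.Int.floordiv (x - st.1) n_tones) * n_tones else x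
          (x', st.2 ++ [x'])) (prev, acc)).2 := by
  induction chord with
  | nil => intro prev acc _; rfl
  | cons x xs ih =>
    intro prev acc hpre
    simp only [List.foldl_cons]
    rcases hpre with hn | hchain
    · rw [pyBumpA_eq prev x n_tones hn]
      exact ih _ _ (Or.inl hn)
    · rw [List.isChain_cons_cons] at hchain
      rw [pyBumpA_of_ge prev x n_tones hchain.1, if_neg (by omega)]
      exact ih _ _ (Or.inr hchain.2)

-- ===== VERDICT (by name: the statement is the Claim_ definition above) =====
theorem adjustOctaveForAscendingChord_spec : Claim_equal_adjustOctaveForAscendingChord := by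
  intro chord n_tones _ hpre
  show _ = _
  exact fold_eq n_tones chord 0 [] hpre
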